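-- pv_equiv track=rewrite | github.com/HamiGames/Lucid | infrastructure/containers/inject_dockerfile_x_files_skeleton.py | line_index_after_last_wheel_block_end_in_stage
-- ===== SOURCE A (Python) =====
-- MARK_WHEEL_END = "# LUCID_PIP_WHEELS_END"
--
-- def line_index_after_last_wheel_block_end_in_stage(
--     lines: list[str], stage_start: int, stage_end: int
-- ) -> int | None:
--     """
--     Line index **after** the last ``# LUCID_PIP_WHEELS_END`` in ``[stage_start, stage_end)``, or
--     ``None`` if no wheel end marker appears in the builder stage.
--     """
--     end_s = MARK_WHEEL_END.strip()
--     last_ei: int | None = None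
--     for i in range(stage_start, min(stage_end, len(lines))):
--         if lines[i].strip() == end_s:
--             last_ei = i
--     if last_ei is None:
--         return None
--     return last_ei + 1
-- ===== SOURCE B (Python) =====
-- MARK_WHEEL_END = "# LUCID_PIP_WHEELS_END"
--
-- def line_index_after_last_wheel_block_end_in_stage(lines, stage_start, stage_end):
--     # Backward scan with early exit: first match from the end is the last match.
--     end_s = MARK_WHEEL_END.strip()
--     hi = min(stage_end, len(lines))
--     for i in range(hi - 1, stage_start - 1, -1):
--         if lines[i].strip() == end_s:
--             return i + 1
--     return None
-- ===== Notes on version B (the rewrite author's own statement) =====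
-- stated objective: alternative
-- what changed: Replaces the forward accumulate-last-match scan with a backward scan that returns on the first match (early exit); same linear cost in the worst case.
import Mathlib
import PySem

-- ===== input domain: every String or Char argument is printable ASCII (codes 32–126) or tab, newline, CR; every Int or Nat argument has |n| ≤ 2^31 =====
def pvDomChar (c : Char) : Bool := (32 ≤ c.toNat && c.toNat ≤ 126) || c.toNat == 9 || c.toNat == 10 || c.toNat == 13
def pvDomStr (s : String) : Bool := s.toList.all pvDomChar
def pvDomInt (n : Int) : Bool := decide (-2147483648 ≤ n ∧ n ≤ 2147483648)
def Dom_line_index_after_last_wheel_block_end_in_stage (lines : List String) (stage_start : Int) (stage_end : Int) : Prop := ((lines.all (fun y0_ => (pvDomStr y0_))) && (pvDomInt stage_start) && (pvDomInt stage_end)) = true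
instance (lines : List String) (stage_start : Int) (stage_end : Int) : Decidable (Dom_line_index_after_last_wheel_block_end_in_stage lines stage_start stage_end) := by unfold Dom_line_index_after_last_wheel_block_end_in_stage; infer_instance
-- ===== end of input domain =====

-- B replaces A's forward accumulate-last-match scan by a backward scan with early exit (alternative decomposition, same cost).

-- ===== PORT A =====
def line_index_after_last_wheel_block_end_in_stage (lines : List String) (stage_start : Int) (stage_end : Int) : Option Int :=
  let end_s := PySem.Str.strip "# LUCID_PIP_WHEELS_END"
  let last_ei : Option Int :=
    (PySem.List.pyRange stage_start (min stage_end (lines.length : Int)) 1).foldl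
      (fun acc i =>
        -- lines[i]: pyGetD with default "" — exact under Pre_, which excludes A's IndexError
        if PySem.Str.strip (PySem.List.pyGetD lines i "") == end_s then some i else acc)
      none
  match last_ei with
  | none => none
  | some l => some (l + 1)

-- ===== PORT B =====
def line_index_after_last_wheel_block_end_in_stage_alt (lines : List String) (stage_start : Int) (stage_end : Int) : Option Int :=
  let end_s := PySem.Str.strip "# LUCID_PIP_WHEELS_END"
  let hi := min stage_end (lines.length : Int)
  match (PySem.List.pyRange (hi - 1) (stage_start - 1) (-1)).find?
      (fun i => PySem.Str.strip (PySem.List.pyGetD lines i "") == end_s) with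
  | some i => some (i + 1)
  | none => none

-- ===== PRECONDITION & SPEC =====
-- Pre_ excludes exactly the inputs on which Python A raises IndexError: a nonempty
-- iteration range starting below -len(lines) (negative-index underflow on lines[i]).
def Pre_line_index_after_last_wheel_block_end_in_stage (lines : List String) (stage_start : Int) (stage_end : Int) : Prop :=
  -(lines.length : Int) ≤ stage_start ∨ min stage_end (lines.length : Int) ≤ stage_start
instance (lines : List String) (stage_start : Int) (stage_end : Int) : Decidable (Pre_line_index_after_last_wheel_block_end_in_stage lines stage_start stage_end) := by unfold Pre_line_index_after_last_wheel_block_end_in_stage; infer_instance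

def pvWitness_line_index_after_last_wheel_block_end_in_stage : List String × Int × Int :=
  (["FROM x", "# LUCID_PIP_WHEELS_END", "RUN y"], 0, 3)

def Spec_line_index_after_last_wheel_block_end_in_stage (lines : List String) (stage_start : Int) (stage_end : Int) (out : Option Int) : Prop := out = line_index_after_last_wheel_block_end_in_stage_alt lines stage_start stage_end
instance (lines : List String) (stage_start : Int) (stage_end : Int) (out : Option Int) : Decidable (Spec_line_index_after_last_wheel_block_end_in_stage lines stage_start stage_end out) := by unfold Spec_line_index_after_last_wheel_block_end_in_stage; infer_instance

-- ===== CLAIM (what is proved, stated in full; the proofs are below) =====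
def Claim_equal_line_index_after_last_wheel_block_end_in_stage : Prop := ∀ (lines : List String) (stage_start : Int) (stage_end : Int), Dom_line_index_after_last_wheel_block_end_in_stage lines stage_start stage_end → Pre_line_index_after_last_wheel_block_end_in_stage lines stage_start stage_end → Spec_line_index_after_last_wheel_block_end_in_stage lines stage_start stage_end (line_index_after_last_wheel_block_end_in_stage lines stage_start stage_end)

-- ===== LEMMAS AND PROOFS =====

-- A's "keep the last match" fold equals "first match of the reversed list", merged with the initial accumulator.
theorem foldl_lastMatch_eq_find?_reverse (l : List Int) (p : Int → Bool) (acc : Option Int) :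
    l.foldl (fun acc i => if p i then some i else acc) acc = (l.reverse.find? p).or acc := by
  induction l generalizing acc with
  | nil => simp
  | cons x l ih =>
    simp only [List.foldl_cons, List.reverse_cons, List.find?_append, ih]
    cases h : l.reverse.find? p <;> simp [Option.or] <;> split <;> simp_all

theorem line_index_eq (lines : List String) (stage_start : Int) (stage_end : Int) :
    line_index_after_last_wheel_block_end_in_stage lines stage_start stage_end =
    line_index_after_last_wheel_block_end_in_stage_alt lines stage_start stage_end := by
  unfold line_index_after_last_wheel_block_end_in_stage line_index_after_last_wheel_block_end_in_stage_alt
  have hrev : PySem.List.pyRange (min stage_end (lines.length : Int) - 1) (stage_start - 1) (-1)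
      = (PySem.List.pyRange stage_start (min stage_end (lines.length : Int)) 1).reverse := by
    rw [PySem.List.pyRange_neg_one_eq_reverse]
    congr 1 <;> ring
  simp only [foldl_lastMatch_eq_find?_reverse, hrev, Option.or_none]
  cases (PySem.List.pyRange stage_start (min stage_end (lines.length : Int)) 1).reverse.find?
      (fun i => PySem.Str.strip (PySem.List.pyGetD lines i "") == PySem.Str.strip "# LUCID_PIP_WHEELS_END") <;> rfl

-- ===== VERDICT (by name: the statement is the Claim_ definition above) =====
theorem line_index_after_last_wheel_block_end_in_stage_spec : Claim_equal_line_index_after_last_wheel_block_end_in_stage := by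
  intro lines ss se _ _
  unfold Spec_line_index_after_last_wheel_block_end_in_stage
  exact line_index_eq lines ss se
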